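-- pv_equiv track=rewrite | github.com/konjoai/squash | squash/integrations/gateway.py | _parse_token
-- ===== SOURCE A (Python) =====
-- def _parse_token(token: str) -> tuple[str, str]:
--     """Return (kind, value). kind ∈ {'uri', 'sha256', 'entry_id', 'invalid'}."""
--     if not token or not isinstance(token, str):
--         return "invalid", ""
--     t = token.strip()
--     if not t:
--         return "invalid", ""
--     if t.startswith("att://"):
--         tail = t[len("att://"):].strip("/")
--         parts = tail.split("/")
--         if len(parts) < 1 or not parts[-1]:
--             return "invalid", ""
--         return "uri", parts[-1]
--     if t.startswith("sha256:"):
--         h = t[len("sha256:"):]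
--         if len(h) >= 16 and all(c in "0123456789abcdef" for c in h.lower()):
--             return "sha256", h.lower()
--         return "invalid", ""
--     if 8 <= len(t) <= 64 and all(c in "0123456789abcdef" for c in t.lower()):
--         return "entry_id", t.lower()
--     return "invalid", ""
-- ===== SOURCE B (Python) =====
-- HEX = "0123456789abcdef"
--
--
-- def _hex_lower(s):
--     """Lowercase s one char at a time, failing fast on the first non-hex char."""
--     out = ""
--     for c in s:
--         c = c.lower()
--         if c not in HEX:
--             return None
--         out += c
--     return out
--
--
-- def _parse_token(token):
--     if not isinstance(token, str):
--         return "invalid", ""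
--     t = token.strip()
--     if t.startswith("att://"):
--         # last non-empty path segment, collected in one backward pass
--         seg = []
--         for c in reversed(t[6:]):
--             if c == "/":
--                 if seg:
--                     break
--             else:
--                 seg.append(c)
--         return ("uri", "".join(reversed(seg))) if seg else ("invalid", "")
--     if t.startswith("sha256:"):
--         h = _hex_lower(t[7:])
--         return ("sha256", h) if h is not None and len(h) >= 16 else ("invalid", "")
--     h = _hex_lower(t)
--     return ("entry_id", h) if h is not None and 8 <= len(h) <= 64 else ("invalid", "")
-- ===== Notes on version B (the rewrite author's own statement) =====
-- stated objective: alternative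
-- what changed: The att:// value is extracted by a single backward scan over the reversed tail (skip trailing slashes, collect the last segment, stop at the next slash) instead of strip('/')+split('/')+parts[-1], and the hex branches use one fused lowercase-and-validate pass with early exit returning the lowered string (or None) instead of lower() plus an all() membership generator; the emptiness guards are absorbed by the branch conditions.
import Mathlib
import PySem

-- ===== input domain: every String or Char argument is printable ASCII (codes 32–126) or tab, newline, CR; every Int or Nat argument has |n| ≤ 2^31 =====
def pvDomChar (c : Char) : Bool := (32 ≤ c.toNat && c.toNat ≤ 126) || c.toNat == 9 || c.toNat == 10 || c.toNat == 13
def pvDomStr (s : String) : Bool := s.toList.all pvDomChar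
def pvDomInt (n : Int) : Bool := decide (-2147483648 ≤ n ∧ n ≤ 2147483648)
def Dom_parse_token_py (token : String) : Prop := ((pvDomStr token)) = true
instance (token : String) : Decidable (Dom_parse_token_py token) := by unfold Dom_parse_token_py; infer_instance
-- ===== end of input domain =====

-- B extracts the att:// value by one backward scan over the reversed tail (instead of A's
-- strip('/')+split('/')+parts[-1]) and validates/lowercases the hex branches in one fused
-- per-char pass with early exit (instead of lower() plus an all() generator); alternative, not claimed faster.

-- ===== PORT A =====
def parse_token_py (token : String) : String × String :=
  if token = "" then ("invalid", "")
  else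
    let t := PySem.Str.strip token
    if t = "" then ("invalid", "")
    else if PySem.Str.startswith t "att://" then
      let tail := PySem.Str.stripChars (PySem.Str.slice t (some 6) none) "/"
      let parts := (PySem.Str.split? tail "/").getD []
      if parts.length < 1 then ("invalid", "")
      else if PySem.List.pyGetD parts (-1) "" = "" then ("invalid", "")
      else ("uri", PySem.List.pyGetD parts (-1) "")
    else if PySem.Str.startswith t "sha256:" then
      let h := PySem.Str.slice t (some 7) none
      if 16 ≤ PySem.Str.len h ∧
          (PySem.Str.lower h).toList.all (fun c => "0123456789abcdef".toList.contains c) then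
        ("sha256", PySem.Str.lower h)
      else ("invalid", "")
    else if (8 ≤ PySem.Str.len t ∧ PySem.Str.len t ≤ 64) ∧
        (PySem.Str.lower t).toList.all (fun c => "0123456789abcdef".toList.contains c) then
      ("entry_id", PySem.Str.lower t)
    else ("invalid", "")

-- ===== PORT B =====
-- backward pass of Source B: skip trailing '/', collect the last segment, stop at the next '/'
def pvSegGo : List Char → List Char → List Char
  | [], seg => seg
  | c :: cs, seg =>
      if c == '/' then (if seg = [] then pvSegGo cs seg else seg)
      else pvSegGo cs (seg ++ [c])

-- fused lowercase-and-validate pass of Source B's _hex_lower (none = Python's None)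
def pvHexLower : List Char → Option (List Char)
  | [] => some []
  | c :: cs =>
      let c' := PySem.Chars.lowerChar c
      if "0123456789abcdef".toList.contains c' then (pvHexLower cs).map (fun r => c' :: r)
      else none

def parse_token_py_alt (token : String) : String × String :=
  let t := PySem.Str.strip token
  if PySem.Str.startswith t "att://" then
    let seg := pvSegGo (PySem.Str.slice t (some 6) none).toList.reverse []
    if seg ≠ [] then ("uri", String.ofList seg.reverse) else ("invalid", "")
  else if PySem.Str.startswith t "sha256:" then
    match pvHexLower (PySem.Str.slice t (some 7) none).toList with
    | some h => if 16 ≤ h.length then ("sha256", String.ofList h) else ("invalid", "")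
    | none => ("invalid", "")
  else
    match pvHexLower t.toList with
    | some h => if 8 ≤ h.length ∧ h.length ≤ 64 then ("entry_id", String.ofList h) else ("invalid", "")
    | none => ("invalid", "")

-- ===== PRECONDITION & SPEC =====
def Spec_parse_token_py (token : String) (out : String × String) : Prop := out = parse_token_py_alt token
instance (token : String) (out : String × String) : Decidable (Spec_parse_token_py token out) := by unfold Spec_parse_token_py; infer_instance

-- ===== CLAIM (what is proved, stated in full; the proofs are below) =====
def Claim_equal_parse_token_py : Prop := ∀ (token : String), Dom_parse_token_py token → Spec_parse_token_py token (parse_token_py token)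

-- ===== LEMMAS AND PROOFS =====

theorem pv_go_single (c : Char) :
    ∀ (fuel : ℕ) (l cur : List Char) (acc : List (List Char)), l.length ≤ fuel →
      PySem.Chars.splitOn.go [c] fuel l cur acc
        = acc.reverse ++ List.modifyHead (cur.reverse ++ ·) (l.splitOnP (· == c)) := by
  intro fuel
  induction fuel with
  | zero =>
    intro l cur acc hl
    have : l = [] := List.eq_nil_of_length_eq_zero (Nat.le_zero.mp hl)
    subst this
    rw [PySem.Chars.splitOn.go.eq_def]
    simp [List.splitOnP_nil]
  | succ f ih =>
    intro l cur acc hl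
    cases l with
    | nil =>
      rw [PySem.Chars.splitOn.go.eq_def]
      simp [List.splitOnP_nil]
    | cons x rest =>
      rw [PySem.Chars.splitOn.go.eq_def]
      by_cases hx : x = c
      · subst hx
        have hpre : [x].isPrefixOf (x :: rest) = true := by simp [List.isPrefixOf]
        simp only [hpre, if_true, List.length_cons] at *
        have hdrop : List.drop (([] : List Char).length + 1) (x :: rest) = rest := by simp
        rw [hdrop, ih rest [] (cur.reverse :: acc) (by simpa using Nat.le_of_succ_le_succ hl)]
        rw [List.splitOnP_cons]
        cases h : List.splitOnP (fun z => z == x) rest with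
        | nil => exact absurd h (List.splitOnP_ne_nil _ _)
        | cons s ss => simp
      · have hpre : [c].isPrefixOf (x :: rest) = false := by
          simp [List.isPrefixOf]
          exact fun h => absurd h.symm hx
        simp only [hpre, Bool.false_eq_true, if_false]
        rw [ih rest (x :: cur) acc (by simpa using Nat.le_of_succ_le_succ hl)]
        rw [List.splitOnP_cons]
        have hxc : (x == c) = false := by simp [hx]
        rw [hxc]
        simp only [Bool.false_eq_true, if_false]
        congr 1
        cases h : rest.splitOnP (· == c) with
        | nil => exact absurd h (List.splitOnP_ne_nil _ _)
        | cons s ss => simp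

theorem pv_modifyHead_nil_append (S : List (List Char)) (h : S ≠ []) :
    List.modifyHead (fun x : List Char => x) S = S := by
  cases S with
  | nil => exact absurd rfl h
  | cons s ss => simp

theorem pv_splitOn_single (c : Char) (cs : List Char) :
    PySem.Chars.splitOn cs [c] = cs.splitOnP (· == c) := by
  unfold PySem.Chars.splitOn
  rw [pv_go_single c (cs.length + 1) cs [] [] (Nat.le_succ _)]
  simp only [List.reverse_nil, List.nil_append]
  exact pv_modifyHead_nil_append _ (List.splitOnP_ne_nil _ _)

theorem pv_splitOnP_append_sep (P : Char → Bool) (y : Char) (hy : P y = true) (ys : List Char) :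
    (ys ++ [y]).splitOnP P = ys.splitOnP P ++ [[]] := by
  induction ys with
  | nil => simp [List.splitOnP_cons, List.splitOnP_nil, hy]
  | cons x xs ih =>
    rw [List.cons_append, List.splitOnP_cons, List.splitOnP_cons, ih]
    by_cases hx : P x
    · simp [hx]
    · simp only [hx, Bool.false_eq_true, if_false]
      cases h : xs.splitOnP P with
      | nil => exact absurd h (List.splitOnP_ne_nil _ _)
      | cons s ss => simp

theorem pv_splitOnP_append_nonsep (P : Char → Bool) (y : Char) (hy : P y = false) (ys : List Char) :
    (ys ++ [y]).splitOnP P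
      = (ys.splitOnP P).dropLast ++ [((ys.splitOnP P).getLastD []) ++ [y]] := by
  induction ys with
  | nil => simp [List.splitOnP_cons, List.splitOnP_nil, hy]
  | cons x xs ih =>
    rw [List.cons_append, List.splitOnP_cons, List.splitOnP_cons, ih]
    by_cases hx : P x
    · simp only [hx, if_true]
      cases h : xs.splitOnP P with
      | nil => exact absurd h (List.splitOnP_ne_nil _ _)
      | cons s ss =>
        cases ss with
        | nil => simp
        | cons s2 ss2 => simp
    · simp only [hx, Bool.false_eq_true, if_false]
      cases h : xs.splitOnP P with
      | nil => exact absurd h (List.splitOnP_ne_nil _ _)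
      | cons s ss =>
        cases ss with
        | nil => simp
        | cons s2 ss2 => simp

theorem pv_ofList_eq_empty (x : List Char) : String.ofList x = "" ↔ x = [] := by
  constructor
  · intro h; have := congrArg String.toList h; simpa using this
  · intro h; subst h; simp

theorem pv_split?_eq (u : String) :
    PySem.Str.split? u "/" = some ((u.toList.splitOnP (· == '/')).map String.ofList) := by
  have h1 : ("/" : String).toList = ['/'] := by decide
  rw [PySem.Str.split?, h1, PySem.Chars.split?]
  simp [pv_splitOn_single]

theorem pv_getLast_map (l : List (List Char)) (h : l ≠ []) (hm : l.map String.ofList ≠ []) :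
    (l.map String.ofList).getLast hm = String.ofList (l.getLastD []) := by
  have h1 : (l.map String.ofList).getLast? = some ((l.map String.ofList).getLast hm) :=
    List.getLast?_eq_some_getLast hm
  rw [List.getLast?_map] at h1
  rw [List.getLastD_eq_getLast?]
  cases h2 : l.getLast? with
  | none => exact absurd (List.getLast?_eq_none_iff.mp h2) h
  | some m =>
    rw [h2] at h1
    simp only [Option.map_some, Option.some.injEq] at h1
    simp [h1]

-- dropping a trailing '/' changes neither the last segment …
theorem pv_tw_append (l : List Char) :
    List.takeWhile (fun c => !(c == '/')) (l ++ ['/'])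
      = List.takeWhile (fun c => !(c == '/')) l := by
  induction l with
  | nil => simp
  | cons x xs ih =>
    rw [List.cons_append, List.takeWhile_cons, List.takeWhile_cons]
    by_cases hx : (x == '/') = true
    · simp [hx]
    · simp [eq_false_of_ne_true hx, ih]

theorem pv_twdw_append (l : List Char) :
    List.takeWhile (fun c => !(c == '/')) (List.dropWhile (· == '/') (l ++ ['/']))
      = List.takeWhile (fun c => !(c == '/')) (List.dropWhile (· == '/') l) := by
  induction l with
  | nil => simp
  | cons x xs ih =>
    rw [List.cons_append, List.dropWhile_cons, List.dropWhile_cons]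
    by_cases hx : (x == '/') = true
    · rw [if_pos hx, if_pos hx]
      exact ih
    · rw [if_neg hx, if_neg hx]
      simp [eq_false_of_ne_true hx, pv_tw_append]

-- … nor does dropping a leading-'/' prefix
theorem pv_strip_shift (v : List Char) :
    List.takeWhile (fun c => !(c == '/'))
        (List.dropWhile (· == '/') (List.dropWhile (· == '/') v).reverse)
      = List.takeWhile (fun c => !(c == '/')) (List.dropWhile (· == '/') v.reverse) := by
  induction v with
  | nil => rfl
  | cons c v' ih =>
    rw [List.dropWhile_cons]
    by_cases hc : (c == '/') = true
    · rw [if_pos hc, ih, List.reverse_cons]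
      have hc' : c = '/' := by simpa using hc
      rw [hc', pv_twdw_append]
    · rw [if_neg hc]

-- the last piece of a '/'-split, read off the reversed list
theorem pv_lastSeg (cs : List Char) :
    (cs.splitOnP (· == '/')).getLastD []
      = (cs.reverse.takeWhile (fun c => !(c == '/'))).reverse := by
  induction cs using List.reverseRecOn with
  | nil => simp [List.splitOnP_nil]
  | append_singleton ys y ih =>
    by_cases hy : (y == '/') = true
    · rw [pv_splitOnP_append_sep _ y hy ys, List.getLastD_concat, List.reverse_append]
      simp [hy]
    · have hyf : (y == '/') = false := eq_false_of_ne_true hy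
      rw [pv_splitOnP_append_nonsep _ y hyf ys, List.getLastD_concat, List.reverse_append]
      simp [hyf]
      rw [← List.getLastD_eq_getLast?]
      exact ih

-- pvSegGo after the first collected char is takeWhile
theorem pv_segGo_ne (cs : List Char) : ∀ seg : List Char, seg ≠ [] →
    pvSegGo cs seg = seg ++ cs.takeWhile (fun c => !(c == '/')) := by
  induction cs with
  | nil => intro seg _; simp [pvSegGo]
  | cons c cs' ih =>
    intro seg hseg
    by_cases hc : (c == '/') = true
    · simp [pvSegGo, hc, hseg]
    · have hcf : (c == '/') = false := eq_false_of_ne_true hc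
      simp only [pvSegGo, hcf, Bool.false_eq_true, if_false]
      rw [ih (seg ++ [c]) (by simp), List.takeWhile_cons]
      simp [hcf]

-- pvSegGo from the empty accumulator is takeWhile ∘ dropWhile
theorem pv_segGo_nil (l : List Char) :
    pvSegGo l [] = (l.dropWhile (· == '/')).takeWhile (fun c => !(c == '/')) := by
  induction l with
  | nil => simp [pvSegGo]
  | cons c cs ih =>
    rw [List.dropWhile_cons]
    by_cases hc : (c == '/') = true
    · rw [if_pos hc, ← ih]
      simp [pvSegGo, hc]
    · have hcf : (c == '/') = false := eq_false_of_ne_true hc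
      rw [if_neg hc]
      simp [pvSegGo, hcf, pv_segGo_ne cs [c] (by simp)]

-- the att:// branches agree
theorem pv_att_eq (u : String) :
    (let parts := (PySem.Str.split? (PySem.Str.stripChars u "/") "/").getD [];
     if parts.length < 1 then (("invalid", "") : String × String)
     else if PySem.List.pyGetD parts (-1) "" = "" then ("invalid", "")
     else ("uri", PySem.List.pyGetD parts (-1) ""))
    = (let seg := pvSegGo u.toList.reverse [];
       if seg ≠ [] then (("uri", String.ofList seg.reverse) : String × String)
       else ("invalid", "")) := by
  have h1 : ("/" : String).toList = ['/'] := by decide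
  set w : List Char := PySem.Chars.stripChars u.toList ['/'] with hw
  have hparts : (PySem.Str.split? (PySem.Str.stripChars u "/") "/").getD []
      = (w.splitOnP (· == '/')).map String.ofList := by
    rw [pv_split?_eq, PySem.Str.toList_stripChars, h1]
    rfl
  have hp : (fun c => (['/'] : List Char).contains c) = (fun c : Char => c == '/') := by
    funext c; simp [BEq.beq]
  set seg : List Char := pvSegGo u.toList.reverse [] with hseg
  have hsegv : seg = List.takeWhile (fun c => !(c == '/'))
      (List.dropWhile (· == '/') u.toList.reverse) := pv_segGo_nil _
  have hwlast : (w.splitOnP (· == '/')).getLastD [] = seg.reverse := by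
    rw [pv_lastSeg]
    have hwrev : w.reverse
        = List.dropWhile (· == '/') (List.dropWhile (· == '/') u.toList).reverse := by
      rw [hw]
      unfold PySem.Chars.stripChars
      rw [hp, List.reverse_reverse]
    rw [hwrev, pv_strip_shift, hsegv]
  have hTne : w.splitOnP (· == '/') ≠ [] := List.splitOnP_ne_nil _ _
  have hmapne : (w.splitOnP (· == '/')).map String.ofList ≠ [] := by simpa using hTne
  have hget : PySem.List.pyGetD ((w.splitOnP (· == '/')).map String.ofList) (-1) ""
      = String.ofList seg.reverse := by
    rw [PySem.List.pyGetD_neg_one _ _ hmapne, pv_getLast_map _ hTne hmapne, hwlast]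
  simp only [hparts]
  rw [if_neg (by simpa using hTne), hget]
  by_cases hs : seg = []
  · rw [if_pos (by rw [hs]; rfl), if_neg (by simp [hs])]
  · rw [if_neg (by
        rw [pv_ofList_eq_empty]
        simpa using hs),
      if_pos hs]

-- pvHexLower in closed form
theorem pv_hex (l : List Char) :
    pvHexLower l
      = if l.all (fun c => "0123456789abcdef".toList.contains (PySem.Chars.lowerChar c))
        then some (PySem.Chars.lower l) else none := by
  induction l with
  | nil => rfl
  | cons c cs ih =>
    show (if "0123456789abcdef".toList.contains (PySem.Chars.lowerChar c) then
        (pvHexLower cs).map (fun r => PySem.Chars.lowerChar c :: r) else none) = _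
    rw [List.all_cons, ih]
    by_cases hc : ("0123456789abcdef".toList.contains (PySem.Chars.lowerChar c)) = true
    · rw [if_pos hc, hc, Bool.true_and]
      by_cases hall : (cs.all fun x => "0123456789abcdef".toList.contains (PySem.Chars.lowerChar x)) = true
      · rw [if_pos hall, if_pos hall]
        rfl
      · rw [if_neg hall, if_neg hall]
        rfl
    · rw [if_neg hc, eq_false_of_ne_true hc, Bool.false_and]
      rw [if_neg (by simp)]

theorem pv_all_lower (s : String) :
    (PySem.Str.lower s).toList.all (fun c => "0123456789abcdef".toList.contains c)
      = s.toList.all (fun c => "0123456789abcdef".toList.contains (PySem.Chars.lowerChar c)) := by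
  rw [PySem.Str.toList_lower]
  unfold PySem.Chars.lower
  rw [List.all_map]
  rfl

theorem pv_lower_ofList (s : String) :
    String.ofList (PySem.Chars.lower s.toList) = PySem.Str.lower s := by
  rw [← PySem.Str.toList_lower, String.ofList_toList]

theorem pv_lower_len (s : String) : (PySem.Chars.lower s.toList).length = PySem.Str.len s := by
  rw [PySem.Str.len_eq]
  simp [PySem.Chars.lower]

-- the sha256: branches agree
theorem pv_hex_branch16 (s kind : String) :
    (if 16 ≤ PySem.Str.len s ∧
        (PySem.Str.lower s).toList.all (fun c => "0123456789abcdef".toList.contains c) then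
      ((kind, PySem.Str.lower s) : String × String)
    else ("invalid", ""))
    = (match pvHexLower s.toList with
      | some h => if 16 ≤ h.length then (kind, String.ofList h)
          else (("invalid", "") : String × String)
      | none => ("invalid", "")) := by
  rw [pv_hex]
  by_cases hall : (s.toList.all fun c => "0123456789abcdef".toList.contains (PySem.Chars.lowerChar c)) = true
  · rw [if_pos hall]
    dsimp only
    rw [pv_all_lower, pv_lower_ofList]
    simp only [hall, and_true]
    refine if_congr ?_ rfl rfl
    rw [← pv_lower_len]
    omega
  · rw [if_neg hall]
    dsimp only
    rw [if_neg (fun hcon => hall (by rw [← pv_all_lower]; exact hcon.2))]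

-- the entry_id branches agree
theorem pv_hex_branch864 (s kind : String) :
    (if (8 ≤ PySem.Str.len s ∧ PySem.Str.len s ≤ 64) ∧
        (PySem.Str.lower s).toList.all (fun c => "0123456789abcdef".toList.contains c) then
      ((kind, PySem.Str.lower s) : String × String)
    else ("invalid", ""))
    = (match pvHexLower s.toList with
      | some h => if 8 ≤ h.length ∧ h.length ≤ 64 then (kind, String.ofList h)
          else (("invalid", "") : String × String)
      | none => ("invalid", "")) := by
  rw [pv_hex]
  by_cases hall : (s.toList.all fun c => "0123456789abcdef".toList.contains (PySem.Chars.lowerChar c)) = true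
  · rw [if_pos hall]
    dsimp only
    rw [pv_all_lower, pv_lower_ofList]
    simp only [hall, and_true]
    refine if_congr ?_ rfl rfl
    rw [← pv_lower_len]
    omega
  · rw [if_neg hall]
    dsimp only
    rw [if_neg (fun hcon => hall (by rw [← pv_all_lower]; exact hcon.2))]

theorem pv_alt_strip_empty (token : String) (h : PySem.Str.strip token = "") :
    parse_token_py_alt token = ("invalid", "") := by
  unfold parse_token_py_alt
  rw [h]
  decide

-- ===== VERDICT (by name: the statement is the Claim_ definition above) =====
theorem parse_token_py_spec : Claim_equal_parse_token_py := by
  intro token _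
  show parse_token_py token = parse_token_py_alt token
  by_cases ht : PySem.Str.strip token = ""
  · rw [pv_alt_strip_empty token ht]
    unfold parse_token_py
    by_cases htok : token = ""
    · rw [if_pos htok]
    · rw [if_neg htok]
      simp [ht]
  · have htok : token ≠ "" := fun h => ht (by rw [h]; decide)
    simp only [parse_token_py, parse_token_py_alt]
    rw [if_neg htok, if_neg ht]
    by_cases hatt : PySem.Str.startswith (PySem.Str.strip token) "att://" = true
    · rw [if_pos hatt, if_pos hatt]
      exact pv_att_eq _
    · rw [if_neg hatt, if_neg hatt]
      by_cases hsha : PySem.Str.startswith (PySem.Str.strip token) "sha256:" = true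
      · rw [if_pos hsha, if_pos hsha]
        exact pv_hex_branch16 (PySem.Str.slice (PySem.Str.strip token) (some 7) none) "sha256"
      · rw [if_neg hsha, if_neg hsha]
        exact pv_hex_branch864 (PySem.Str.strip token) "entry_id"
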